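-- pv_equiv track=rewrite | github.com/ironmask2003/ironmask2003.github.io | chiave.py | check_dipendenze
-- ===== SOURCE A (Python) =====
-- def add_elem(dip: list, temp: list) -> list:
--     for i in dip[1]:
--         # Se l'attributo non è presente lo aggiunge
--         if i not in temp: temp.append(i)
--     return temp
--
-- def check_dipendenze(R: list, F: list) -> list:
--     temp = []
--     for dip in F:
--         temp = add_elem(dip, temp)
--     final = []
--     for at in R:
--         if at not in temp: final.append(at)
--     return final
-- ===== SOURCE B (Python) =====
-- def check_dipendenze(R: list, F: list) -> list:
--     return [at for at in R if not any(at in dip[1] for dip in F)]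
-- ===== Notes on version B (the rewrite author's own statement) =====
-- stated objective: simpler
-- what changed: Replaces A's two-phase build-a-deduplicated-index-then-filter strategy with a one-line comprehension that rescans F per attribute of R.
import Mathlib
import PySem

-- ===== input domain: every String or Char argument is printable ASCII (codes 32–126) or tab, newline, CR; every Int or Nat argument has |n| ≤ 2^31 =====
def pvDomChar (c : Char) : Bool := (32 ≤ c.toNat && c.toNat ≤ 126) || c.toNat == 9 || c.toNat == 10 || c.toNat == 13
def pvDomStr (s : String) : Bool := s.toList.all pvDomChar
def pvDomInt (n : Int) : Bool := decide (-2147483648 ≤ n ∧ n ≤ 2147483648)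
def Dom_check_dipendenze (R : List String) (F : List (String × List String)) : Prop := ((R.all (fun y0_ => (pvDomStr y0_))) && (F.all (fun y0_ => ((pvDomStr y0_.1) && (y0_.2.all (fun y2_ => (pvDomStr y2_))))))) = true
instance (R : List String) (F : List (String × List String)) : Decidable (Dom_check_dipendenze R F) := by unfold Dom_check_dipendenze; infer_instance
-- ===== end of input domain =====

-- B replaces A's build-deduplicated-index-then-filter with a single comprehension that rescans F per attribute (simpler).


-- ===== PORT A =====
def add_elem (dip : String × List String) (temp : List String) : List String :=
  dip.2.foldl (fun temp i => if temp.contains i then temp else temp ++ [i]) temp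

def check_dipendenze (R : List String) (F : List (String × List String)) : List String :=
  let temp := F.foldl (fun temp dip => add_elem dip temp) []
  R.foldl (fun final at_ => if temp.contains at_ then final else final ++ [at_]) []

-- ===== PORT B =====
def check_dipendenze_alt (R : List String) (F : List (String × List String)) : List String :=
  R.filter (fun at_ => !(F.any (fun dip => dip.2.contains at_)))

-- ===== PRECONDITION & SPEC =====
def Spec_check_dipendenze (R : List String) (F : List (String × List String)) (out : List String) : Prop := out = check_dipendenze_alt R F
instance (R : List String) (F : List (String × List String)) (out : List String) : Decidable (Spec_check_dipendenze R F out) := by unfold Spec_check_dipendenze; infer_instance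

-- ===== CLAIM (what is proved, stated in full; the proofs are below) =====
def Claim_equal_check_dipendenze : Prop := ∀ (R : List String) (F : List (String × List String)), Dom_check_dipendenze R F → Spec_check_dipendenze R F (check_dipendenze R F)

-- ===== LEMMAS AND PROOFS =====

-- membership in one add_elem step
theorem mem_add_elem (dip : String × List String) (temp : List String) (x : String) :
    x ∈ add_elem dip temp ↔ x ∈ temp ∨ x ∈ dip.2 := by
  unfold add_elem
  obtain ⟨_, l⟩ := dip
  induction l generalizing temp with
  | nil => simp
  | cons h t ih =>
    simp only [List.foldl_cons]
    by_cases hc : temp.contains h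
    · rw [if_pos hc, ih]
      simp only [List.contains_iff_mem] at hc
      simp only [List.mem_cons]
      constructor
      · rintro (h1 | h1)
        exacts [Or.inl h1, Or.inr (Or.inr h1)]
      · rintro (h1 | rfl | h1)
        exacts [Or.inl h1, Or.inl hc, Or.inr h1]
    · rw [if_neg hc, ih]
      simp only [List.mem_append, List.mem_cons]
      tauto

-- membership in the fully built index = appearing in some dependency
theorem mem_temp (F : List (String × List String)) (init : List String) (x : String) :
    x ∈ F.foldl (fun temp dip => add_elem dip temp) init ↔ x ∈ init ∨ ∃ d ∈ F, x ∈ d.2 := by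
  induction F generalizing init with
  | nil => simp
  | cons d F ih =>
    simp only [List.foldl_cons, ih, mem_add_elem, List.mem_cons]
    constructor
    · rintro (⟨h | h⟩ | ⟨e, he, hx⟩)
      · exact Or.inl h
      · exact Or.inr ⟨d, Or.inl rfl, h⟩
      · exact Or.inr ⟨e, Or.inr he, hx⟩
    · rintro (h | ⟨e, (rfl | he), hx⟩)
      · exact Or.inl (Or.inl h)
      · exact Or.inl (Or.inr hx)
      · exact Or.inr ⟨e, he, hx⟩

-- the filtering foldl is a filter
theorem foldl_filter (p : String → Bool) (R acc : List String) :
    R.foldl (fun final a => if p a then final else final ++ [a]) acc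
      = acc ++ R.filter (fun a => !p a) := by
  induction R generalizing acc with
  | nil => simp
  | cons h t ih =>
    simp only [List.foldl_cons, List.filter_cons]
    by_cases hp : p h
    · simp [hp, ih]
    · simp only [Bool.not_eq_true] at hp
      simp [hp, ih]

-- ===== VERDICT (by name: the statement is the Claim_ definition above) =====
theorem check_dipendenze_spec : Claim_equal_check_dipendenze := by
  intro R F _
  unfold Spec_check_dipendenze check_dipendenze check_dipendenze_alt
  rw [foldl_filter, List.nil_append]
  apply List.filter_congr
  intro a _
  congr 1
  rw [Bool.eq_iff_iff]
  simp only [List.contains_iff_mem, List.any_eq_true, mem_temp, List.not_mem_nil, false_or]
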